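-- pv_equiv track=rewrite | github.com/simply-pouria/CS-Archive | Basic Programming/Question_2.py | factorial_expansion
-- ===== SOURCE A (Python) =====
-- def factorial(number: int) -> int:
--     counter = number
--     while counter > 1:
--
--         number *= counter-1
--         counter -= 1
--     return number
--
-- def biggest_factorial(number: int) -> int:  # returns the biggest factorial that is smaller than or equal to the number
--
--     keep = number  # this is only used to keep the initial value of number
--
--     while True:
--
--         if factorial(number=number) <= keep:
--             return number
--
--         number -= 1
--
-- def factorial_coefficient(number: int, fctl: int) -> int:  # calculates the coefficient of the factorial in the number
--
--     coefficient = 0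
--
--     while number >= factorial(fctl):
--
--         number -= factorial(fctl)
--         coefficient += 1
--
--     return coefficient
--
-- def factorial_expansion(number: int) -> dict:
--     container = {}  # this acts as a container for each step.
--     # the key n, means n! in the factorial expansion, the values are the coefficients of their correlative keys.
--
--     while number >= 1:
--
--         biggest_factorial_number = biggest_factorial(number=number)
--         biggest_factorial_coefficient = factorial_coefficient(number=number,
--                                                               fctl=biggest_factorial_number)
--
--         container[biggest_factorial_number] = biggest_factorial_coefficient
--
--         number -= biggest_factorial_coefficient * factorial(biggest_factorial_number)
--
--     return container
-- ===== SOURCE B (Python) =====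
-- def factorial_expansion(number: int) -> dict:
--     # Ascending factorial-base digits via divmod; dict built highest factorial first,
--     # matching the descending insertion order of the greedy version.
--     items = []
--     n, i = number, 2
--     while n > 0:
--         n, r = divmod(n, i)
--         if r:
--             items.append((i - 1, r))
--         i += 1
--     return dict(reversed(items))
-- ===== Notes on version B (the rewrite author's own statement) =====
-- stated objective: faster
-- what changed: Replaces the descending greedy search (scan down from n recomputing factorial(m) for each m, then repeated subtraction per coefficient) with the ascending factorial-base algorithm: one divmod per digit, collecting nonzero digits least-significant first and building the dict in reversed (descending) order.
import Mathlib
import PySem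

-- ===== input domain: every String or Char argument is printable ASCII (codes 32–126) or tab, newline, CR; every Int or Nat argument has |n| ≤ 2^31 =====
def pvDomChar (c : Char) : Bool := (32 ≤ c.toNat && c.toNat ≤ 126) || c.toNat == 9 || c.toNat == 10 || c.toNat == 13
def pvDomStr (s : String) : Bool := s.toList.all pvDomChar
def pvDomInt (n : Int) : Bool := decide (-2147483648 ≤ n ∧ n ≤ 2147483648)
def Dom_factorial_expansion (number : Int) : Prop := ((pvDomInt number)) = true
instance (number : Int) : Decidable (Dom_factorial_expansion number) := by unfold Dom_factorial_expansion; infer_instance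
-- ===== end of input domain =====

-- B replaces A's descending greedy search (recomputing factorial(m) for every m from n down)
-- by the ascending factorial-base algorithm: one divmod per digit, dict built from the reversed digit list.

-- ===== PORT A =====
-- while counter > 1: number *= counter-1; counter -= 1
def pvFactLoop (number counter : Int) : Int :=
  if 1 < counter then pvFactLoop (number * (counter - 1)) (counter - 1) else number
termination_by counter.toNat
decreasing_by omega

def pyFactorial (number : Int) : Int := pvFactLoop number number

-- while True: if factorial(number) <= keep: return number; number -= 1
-- (fueled: the Python loop always terminates, at latest at number = 1; the fuel is never exhausted on the calls the program makes)
def pvBfLoop : Nat → Int → Int → Int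
  | 0, _, number => number
  | fuel + 1, keep, number =>
    if pyFactorial number ≤ keep then number else pvBfLoop fuel keep (number - 1)

def biggest_factorial (number : Int) : Int := pvBfLoop (number.toNat + 1) number number

-- while number >= factorial(fctl): number -= factorial(fctl); coefficient += 1
def pvFcLoop : Nat → Int → Int → Int → Int
  | 0, _, _, coefficient => coefficient
  | fuel + 1, number, fctl, coefficient =>
    if pyFactorial fctl ≤ number then pvFcLoop fuel (number - pyFactorial fctl) fctl (coefficient + 1)
    else coefficient

def factorial_coefficient (number fctl : Int) : Int := pvFcLoop (number.toNat + 1) number fctl 0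

-- while number >= 1: k = biggest_factorial(number); c = factorial_coefficient(number, k);
--   container[k] = c; number -= c * factorial(k)
def pvFeLoop : Nat → Int → PySem.Dict Int Int → PySem.Dict Int Int
  | 0, _, container => container
  | fuel + 1, number, container =>
    if 1 ≤ number then
      let k := biggest_factorial number
      let c := factorial_coefficient number k
      pvFeLoop fuel (number - c * pyFactorial k) (container.insert k c)
    else container

def factorial_expansion (number : Int) : List (Int × Int) :=
  (pvFeLoop (number.toNat + 1) number PySem.Dict.empty).items

-- ===== PORT B =====
-- while n > 0: n, r = divmod(n, i); if r: items.append((i-1, r)); i += 1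
def pvAltLoop : Nat → Int → Int → List (Int × Int) → List (Int × Int)
  | 0, _, _, items => items
  | fuel + 1, n, i, items =>
    if 0 < n then
      let q := PySem.Int.floordiv n i
      let r := PySem.Int.mod n i
      pvAltLoop fuel q (i + 1) (if r ≠ 0 then items ++ [(i - 1, r)] else items)
    else items

-- return dict(reversed(items))
def factorial_expansion_alt (number : Int) : List (Int × Int) :=
  (PySem.Dict.ofList (pvAltLoop (number.toNat + 1) number 2 []).reverse).items

-- ===== PRECONDITION & SPEC =====
def Spec_factorial_expansion (number : Int) (out : List (Int × Int)) : Prop := out = factorial_expansion_alt number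
instance (number : Int) (out : List (Int × Int)) : Decidable (Spec_factorial_expansion number out) := by unfold Spec_factorial_expansion; infer_instance

-- ===== CLAIM (what is proved, stated in full; the proofs are below) =====
def Claim_equal_factorial_expansion : Prop := ∀ (number : Int), Dom_factorial_expansion number → Spec_factorial_expansion number (factorial_expansion number)

-- ===== LEMMAS AND PROOFS =====

-- the ascending factorial-base digit list of n, positions i-1, i, … (nonzero digits only)
def ascN (n i : Nat) : List (Int × Int) :=
  if h : 0 < n ∧ 2 ≤ i then
    (if n % i = 0 then [] else [((i : Int) - 1, ((n % i : Nat) : Int))]) ++ ascN (n / i) (i + 1)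
  else []
termination_by n
decreasing_by exact Nat.div_lt_self h.1 (by omega)

lemma pvFactLoop_eq (c : Int) (hc : 1 ≤ c) :
    ∀ x : Int, pvFactLoop x c = x * (((c - 1).toNat.factorial : Nat) : Int) := by
  induction c, hc using Int.le_induction with
  | base => intro x; rw [pvFactLoop]; simp
  | succ n hn ih =>
    intro x
    rw [pvFactLoop, if_pos (by omega), show (n + 1 - 1 : Int) = n from by ring, ih]
    rw [show n.toNat = (n - 1).toNat + 1 from by omega, Nat.factorial_succ]
    have h2 : (((n - 1).toNat : Int) + 1) = n := by omega
    push_cast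
    rw [h2]; ring

lemma pyFactorial_eq (n : Int) (hn : 1 ≤ n) :
    pyFactorial n = ((n.toNat.factorial : Nat) : Int) := by
  rw [pyFactorial, pvFactLoop_eq n hn]
  have h1 : n.toNat = (n - 1).toNat + 1 := by omega
  rw [h1, Nat.factorial_succ]
  push_cast
  have h2 : (((n - 1).toNat : Int) + 1) = n := by omega
  rw [h2]

lemma pvBfLoop_spec : ∀ (fuel : Nat) (keep m : Int), 1 ≤ m → m ≤ keep →
    keep < (((m.toNat + 1).factorial : Nat) : Int) → m.toNat ≤ fuel →
    1 ≤ pvBfLoop fuel keep m ∧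
    (((pvBfLoop fuel keep m).toNat.factorial : Nat) : Int) ≤ keep ∧
    keep < ((((pvBfLoop fuel keep m).toNat + 1).factorial : Nat) : Int) := by
  intro fuel
  induction fuel with
  | zero => intro keep m h1 _ _ hf; omega
  | succ f ih =>
    intro keep m h1 h2 h3 hf
    rw [pvBfLoop]
    by_cases hle : pyFactorial m ≤ keep
    · rw [if_pos hle]
      exact ⟨h1, by rwa [pyFactorial_eq m h1] at hle, h3⟩
    · rw [if_neg hle]
      rw [pyFactorial_eq m h1] at hle
      have hm2 : 2 ≤ m := by
        by_contra hc
        have hm1 : m = 1 := by omega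
        rw [hm1] at hle
        simp at hle
        omega
      have hkey : ((m - 1).toNat + 1) = m.toNat := by omega
      refine ih keep (m - 1) (by omega) (by omega) ?_ (by omega)
      rw [hkey]
      omega

lemma pvFcLoop_spec : ∀ (fuel : Nat) (n coefficient fctl : Int) (d : Nat), 0 < d →
    pyFactorial fctl = (d : Int) → 0 ≤ n → n.toNat < fuel →
    pvFcLoop fuel n fctl coefficient = coefficient + ((n.toNat / d : Nat) : Int) := by
  intro fuel
  induction fuel with
  | zero => omega
  | succ f ih =>
    intro n coefficient fctl d hd hfctl hn hf
    rw [pvFcLoop]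
    by_cases hle : pyFactorial fctl ≤ n
    · rw [if_pos hle, ih (n - (pyFactorial fctl)) (coefficient + 1) fctl d hd hfctl
        (by rw [hfctl] at hle ⊢; omega) (by rw [hfctl] at hle ⊢; omega)]
      rw [hfctl] at hle
      have h1 : (n - (d : Int)).toNat = n.toNat - d := by omega
      have h2 : d ≤ n.toNat := by omega
      rw [hfctl, h1, show n.toNat / d = (n.toNat - d) / d + 1 from Nat.div_eq_sub_div hd h2]
      push_cast
      ring
    · rw [if_neg hle, hfctl] at *
      have : n.toNat < d := by omega
      rw [Nat.div_eq_of_lt this]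
      simp

-- core: appending the single top digit (position kk, value c) on top of a smaller number
lemma asc_split : ∀ (dep i n c M kk : Nat), kk + 1 - i = dep → 2 ≤ i → i ≤ kk + 1 →
    1 ≤ c → c ≤ kk → n < M → (i - 1).factorial * M = kk.factorial →
    ascN (n + c * M) i = ascN n i ++ [((kk : Int), (c : Int))] := by
  intro dep
  induction dep with
  | zero =>
    intro i n c M kk hdep h2 hik hc1 hck hnM hfac
    have hi : i = kk + 1 := by omega
    subst hi
    have hM : M = 1 := by
      have := Nat.factorial_pos kk
      have : kk.factorial * M = kk.factorial := by simpa using hfac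
      nlinarith
    have hn0 : n = 0 := by omega
    subst hn0; subst hM
    rw [ascN, dif_pos ⟨by omega, by omega⟩]
    have hmod : (0 + c * 1) % (kk + 1) = c := by
      rw [Nat.mod_eq_of_lt (by omega)]; omega
    have hdiv : (0 + c * 1) / (kk + 1) = 0 := Nat.div_eq_of_lt (by omega)
    rw [hmod, hdiv, if_neg (by omega)]
    rw [ascN, dif_neg (by omega), ascN, dif_neg (by omega)]
    have hkey : ((kk + 1 : Nat) : Int) - 1 = (kk : Int) := by push_cast; ring
    rw [hkey]
    simp
  | succ d ih =>
    intro i n c M kk hdep h2 hik hc1 hck hnM hfac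
    have hik' : i ≤ kk := by omega
    have hdvd : i.factorial ∣ kk.factorial := Nat.factorial_dvd_factorial hik'
    obtain ⟨M', hM'⟩ := hdvd
    have hfi : i.factorial = (i - 1).factorial * i := by
      conv_lhs => rw [show i = (i - 1) + 1 from by omega]
      rw [Nat.factorial_succ, show i - 1 + 1 = i from by omega, Nat.mul_comm]
    have hMiM' : M = i * M' := by
      have hpos := Nat.factorial_pos (i - 1)
      have : (i - 1).factorial * M = (i - 1).factorial * (i * M') := by
        rw [hfac, hM', hfi]; ring
      exact Nat.eq_of_mul_eq_mul_left hpos this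
    have hipos : 0 < i := by omega
    have hNpos : 0 < n + c * M := by
      have : 0 < M := by omega
      positivity
    have hmod : (n + c * M) % i = n % i := by
      rw [hMiM', show n + c * (i * M') = n + (c * M') * i by ring, Nat.add_mul_mod_self_right]
    have hdiv : (n + c * M) / i = n / i + c * M' := by
      rw [hMiM', show n + c * (i * M') = n + (c * M') * i by ring, Nat.add_mul_div_right _ _ hipos]
    have hrec : ascN (n / i + c * M') (i + 1) = ascN (n / i) (i + 1) ++ [((kk : Int), (c : Int))] := by
      refine ih (i + 1) (n / i) c M' kk (by omega) (by omega) (by omega) hc1 hck ?_ ?_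
      · rw [Nat.div_lt_iff_lt_mul hipos]
        calc n < M := hnM
        _ = M' * i := by rw [hMiM']; ring
      · rw [show i + 1 - 1 = i by omega, ← hM']
    rw [ascN, dif_pos ⟨hNpos, h2⟩, hmod, hdiv, hrec]
    by_cases hn0 : 0 < n
    · conv_rhs => rw [ascN, dif_pos ⟨hn0, h2⟩]
      simp [List.append_assoc]
    · have : n = 0 := by omega
      subst this
      simp [ascN]

-- one step of the greedy expansion removes exactly the top digit
lemma asc_top (N kk : Nat) (hkk : 1 ≤ kk)
    (hlo : kk.factorial ≤ N) (hhi : N < (kk + 1).factorial) :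
    ascN N 2 = ascN (N % kk.factorial) 2 ++ [((kk : Int), ((N / kk.factorial : Nat) : Int))] := by
  have hfpos := Nat.factorial_pos kk
  have hc1 : 1 ≤ N / kk.factorial := (Nat.one_le_div_iff hfpos).mpr hlo
  have hck : N / kk.factorial ≤ kk := by
    have : N / kk.factorial < kk + 1 := by
      rw [Nat.div_lt_iff_lt_mul hfpos]
      calc N < (kk + 1).factorial := hhi
      _ = (kk + 1) * kk.factorial := Nat.factorial_succ kk
    omega
  have hsplit := asc_split (kk + 1 - 2) 2 (N % kk.factorial) (N / kk.factorial) kk.factorial kk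
    rfl (by omega) (by omega) hc1 hck (Nat.mod_lt _ hfpos) (by simp [Nat.factorial])
  rw [← hsplit]
  congr 1
  rw [Nat.mod_add_div']

lemma pvFeLoop_eq : ∀ (fuel : Nat) (n : Int) (acc : PySem.Dict Int Int), 0 ≤ n → n.toNat < fuel →
    (∀ p ∈ acc.items, n < ((p.1.toNat.factorial : Nat) : Int) ∧ 1 ≤ p.1) →
    (pvFeLoop fuel n acc).items = acc.items ++ (ascN n.toNat 2).reverse := by
  intro fuel
  induction fuel with
  | zero => omega
  | succ f ih =>
    intro n acc hn hf hinv
    rw [pvFeLoop]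
    by_cases h1 : 1 ≤ n
    · rw [if_pos h1]
      -- the biggest factorial
      obtain ⟨hk1, hklo, hkhi⟩ := pvBfLoop_spec (n.toNat + 1) n n h1 le_rfl
        (by
          have := Nat.self_le_factorial (n.toNat + 1)
          omega)
        (by omega)
      rw [← show biggest_factorial n = pvBfLoop (n.toNat + 1) n n from rfl] at hk1 hklo hkhi
      set k : Int := biggest_factorial n with hkdef
      set kk : Nat := k.toNat with hkkdef
      have hkcast : (kk : Int) = k := by omega
      -- the coefficient
      have hcval : factorial_coefficient n k = ((n.toNat / kk.factorial : Nat) : Int) := by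
        rw [factorial_coefficient,
          pvFcLoop_spec (n.toNat + 1) n 0 k kk.factorial (Nat.factorial_pos kk)
            (pyFactorial_eq k hk1) hn (by omega)]
        simp
      set C : Nat := n.toNat / kk.factorial with hCdef
      set R : Nat := n.toNat % kk.factorial with hRdef
      have hCfk : C * kk.factorial + R = n.toNat := Nat.div_add_mod' n.toNat kk.factorial
      have hRlt : R < kk.factorial := Nat.mod_lt _ (Nat.factorial_pos kk)
      have hfk_le : (kk.factorial : Int) ≤ n := hklo
      -- the new remainder
      have hnext : n - factorial_coefficient n k * pyFactorial k = ((R : Nat) : Int) := by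
        rw [hcval, pyFactorial_eq k hk1, ← hkkdef]
        omega
      -- the insert appends (k is not a key of acc)
      have hfresh : acc.contains k = false := by
        rw [PySem.Dict.contains_eq_decide_mem_keys]
        simp only [decide_eq_false_iff_not]
        intro hmem
        rw [PySem.Dict.keys] at hmem
        obtain ⟨p, hp, hpk⟩ := List.mem_map.mp hmem
        obtain ⟨hplt, hp1⟩ := hinv p hp
        rw [hpk] at hplt hp1
        have : (kk.factorial : Int) < (kk.factorial : Int) := lt_of_le_of_lt hfk_le hplt
        omega
      have hins : (acc.insert k (factorial_coefficient n k)).items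
          = acc.items ++ [(k, factorial_coefficient n k)] := by
        rw [PySem.Dict.items_insert, hfresh]
        simp
      -- the recursive call
      have hrec := ih (((R : Nat) : Int)) (acc.insert k (factorial_coefficient n k))
        (by positivity)
        (by omega)
        (by
          intro p hp
          rw [hins, List.mem_append] at hp
          rcases hp with hp | hp
          · obtain ⟨hplt, hp1⟩ := hinv p hp
            refine ⟨lt_of_le_of_lt ?_ hplt, hp1⟩
            omega
          · simp at hp
            rw [hp]
            refine ⟨?_, hk1⟩
            show ((R : Nat) : Int) < ((k.toNat.factorial : Nat) : Int)
            rw [← hkkdef]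
            exact_mod_cast hRlt)
      show (pvFeLoop f (n - factorial_coefficient n k * pyFactorial k)
          (acc.insert k (factorial_coefficient n k))).items = acc.items ++ (ascN n.toNat 2).reverse
      rw [hnext, hrec, hins]
      have hasc : ascN n.toNat 2 = ascN R 2 ++ [((kk : Int), ((C : Nat) : Int))] :=
        asc_top n.toNat kk (by omega) (by omega) (by omega)
      have hRtoNat : (((R : Nat) : Int)).toNat = R := by omega
      rw [hRtoNat, hasc, List.reverse_append, hcval, hkcast]
      simp
    · rw [if_neg h1]
      have : n.toNat = 0 := by omega
      rw [this, ascN, dif_neg (by omega)]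
      simp

lemma factorial_expansion_closed (n : Int) :
    factorial_expansion n = (ascN n.toNat 2).reverse := by
  by_cases h : 0 ≤ n
  · rw [factorial_expansion, pvFeLoop_eq (n.toNat + 1) n PySem.Dict.empty h (by omega)
      (by intro p hp; simp [PySem.Dict.empty] at hp)]
    simp [PySem.Dict.empty]
  · have h0 : n.toNat = 0 := by omega
    rw [factorial_expansion, h0, pvFeLoop, if_neg (by omega), ascN, dif_neg (by omega)]
    simp [PySem.Dict.empty]

lemma pvAltLoop_eq : ∀ (fuel : Nat) (n i : Int) (items : List (Int × Int)), 2 ≤ i →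
    n.toNat < fuel →
    pvAltLoop fuel n i items = items ++ ascN n.toNat i.toNat := by
  intro fuel
  induction fuel with
  | zero => omega
  | succ f ih =>
    intro n i items hi hf
    rw [pvAltLoop]
    by_cases hn : 0 < n
    · rw [if_pos hn]
      have hncast : ((n.toNat : Nat) : Int) = n := by omega
      have hicast : ((i.toNat : Nat) : Int) = i := by omega
      have hq : PySem.Int.floordiv n i = ((n.toNat / i.toNat : Nat) : Int) := by
        rw [← hncast, ← hicast]; exact_mod_cast PySem.Int.floordiv_natCast n.toNat i.toNat
      have hr : PySem.Int.mod n i = ((n.toNat % i.toNat : Nat) : Int) := by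
        rw [← hncast, ← hicast]; exact_mod_cast PySem.Int.mod_natCast n.toNat i.toNat
      have hdiv_lt : n.toNat / i.toNat < n.toNat :=
        Nat.div_lt_self (by omega) (by omega)
      rw [hq, hr, ih _ _ _ (by omega) (by simp only [Int.toNat_natCast]; omega)]
      have hqn : (((n.toNat / i.toNat : Nat) : Int)).toNat = n.toNat / i.toNat := by
        simp only [Int.toNat_natCast]
      have hin : (i + 1).toNat = i.toNat + 1 := by omega
      rw [hqn, hin]
      conv_rhs => rw [ascN, dif_pos ⟨by omega, by omega⟩]
      by_cases hz : n.toNat % i.toNat = 0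
      · rw [if_neg (by simp [hz]), hz]
        simp
      · rw [if_pos (by exact_mod_cast hz), if_neg hz]
        simp [hicast]
    · rw [if_neg hn]
      have : n.toNat = 0 := by omega
      rw [this, ascN, dif_neg (by omega)]
      simp

-- the keys of ascN are strictly increasing (so the reversed digit list has distinct keys)
lemma ascN_key_lb : ∀ (n i : Nat), ∀ p ∈ ascN n i, (i : Int) - 1 ≤ p.1 := by
  intro n
  induction n using Nat.strong_induction_on with
  | _ n ih =>
    intro i p hp
    rw [ascN] at hp
    split at hp
    · rename_i h
      rw [List.mem_append] at hp
      rcases hp with hp | hp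
      · split at hp
        · simp at hp
        · simp at hp; rw [hp]
      · have := ih (n / i) (Nat.div_lt_self h.1 (by omega)) (i + 1) p hp
        push_cast at this ⊢
        omega
    · simp at hp

lemma ascN_keys_nodup : ∀ (n i : Nat), 2 ≤ i → ((ascN n i).map Prod.fst).Nodup := by
  intro n
  induction n using Nat.strong_induction_on with
  | _ n ih =>
    intro i hi
    rw [ascN]
    split
    · rename_i h
      rw [List.map_append, List.nodup_append]
      refine ⟨?_, ih (n / i) (Nat.div_lt_self h.1 (by omega)) (i + 1) (by omega), ?_⟩
      · split <;> simp
      · intro a ha b hb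
        split at ha
        · simp at ha
        · simp at ha
          obtain ⟨p, hp, hpb⟩ := List.mem_map.mp hb
          have := ascN_key_lb (n / i) (i + 1) p hp
          rw [hpb] at this
          rw [ha]
          push_cast at this
          omega
    · simp

lemma factorial_expansion_alt_closed (n : Int) :
    factorial_expansion_alt n = (ascN n.toNat 2).reverse := by
  rw [factorial_expansion_alt, pvAltLoop_eq (n.toNat + 1) n 2 [] (by omega) (by omega)]
  have h2 : ((2 : Int)).toNat = 2 := rfl
  rw [h2, List.nil_append]
  have hfold : PySem.Dict.ofList (ascN n.toNat 2).reverse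
      = (ascN n.toNat 2).reverse.foldl (fun d p => d.insert p.1 p.2) PySem.Dict.empty := rfl
  rw [hfold]
  have := PySem.Dict.items_foldl_insert_fresh (l := (ascN n.toNat 2).reverse)
    (k := Prod.fst) (v := Prod.snd) (d := PySem.Dict.empty)
    (by intro a _; exact PySem.Dict.contains_empty _)
    (by
      rw [List.map_reverse, List.nodup_reverse]
      exact ascN_keys_nodup n.toNat 2 (by omega))
  simp only [PySem.Dict.empty] at this ⊢
  rw [this]
  simp

-- ===== VERDICT (by name: the statement is the Claim_ definition above) =====
theorem factorial_expansion_spec : Claim_equal_factorial_expansion := by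
  intro n _
  unfold Spec_factorial_expansion
  rw [factorial_expansion_closed, factorial_expansion_alt_closed]
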